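-- pv_equiv track=rewrite | github.com/schiob/TestingSistemas | ago-dic-2021/Saul Alejandro Cavazos Nelson/parcial_uno/parcial_uno.py | parcial_uno
-- ===== SOURCE A (Python) =====
-- def parcial_uno(entrada):
--     guiso=str(entrada).split()
--     n=len(guiso)
--     precio=0
--     if n<=30:
--         for i in range (0,n,1) :
--             if guiso[i] == 'cachete':
--                 precio+=13
--             elif guiso[i] == 'lengua':
--                 precio+=10
--             elif guiso[i] == 'tripitas':
--                 precio+=9
--             elif guiso[i] == 'pastor':
--                 precio+=15
--             elif guiso[i] == 'machito':
--                 precio+=14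
--     return precio
-- ===== SOURCE B (Python) =====
-- MENU = [('cachete', 13), ('lengua', 10), ('tripitas', 9), ('pastor', 15), ('machito', 14)]
--
-- def parcial_uno(entrada):
--     palabras = str(entrada).split()
--     if len(palabras) > 30:
--         return 0
--     total = 0
--     for nombre, precio in MENU:
--         total += palabras.count(nombre) * precio
--     return total
-- ===== Notes on version B (the rewrite author's own statement) =====
-- stated objective: alternative
-- what changed: Inverts the loop nesting: instead of one pass over the words with a per-word elif price chain, B loops over the 5 fixed menu entries and uses list.count to scan the word list once per entry, accumulating count*price.
import Mathlib
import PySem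

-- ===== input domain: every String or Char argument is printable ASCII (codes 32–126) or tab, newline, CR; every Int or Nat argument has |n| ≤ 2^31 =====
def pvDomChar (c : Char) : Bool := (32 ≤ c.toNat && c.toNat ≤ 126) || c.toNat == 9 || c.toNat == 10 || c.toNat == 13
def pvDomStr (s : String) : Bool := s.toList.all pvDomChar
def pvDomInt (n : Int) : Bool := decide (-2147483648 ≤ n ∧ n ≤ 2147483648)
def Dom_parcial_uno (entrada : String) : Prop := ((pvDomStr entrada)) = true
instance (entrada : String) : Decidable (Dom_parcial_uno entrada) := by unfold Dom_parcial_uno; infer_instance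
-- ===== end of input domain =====

-- B inverts the loop nesting: it loops over the 5 menu entries counting each name's occurrences in the word list, instead of A's per-word elif price chain (alternative decomposition, same cost class).


-- ===== PORT A =====
def parcial_uno (entrada : String) : Int :=
  let guiso := PySem.Str.split₀ entrada
  let n : Int := (guiso.length : Int)
  let precio : Int := 0
  if n ≤ 30 then
    (PySem.List.pyRange 0 n 1).foldl (fun precio i =>
      if PySem.List.pyGetD guiso i "" == "cachete" then precio + 13
      else if PySem.List.pyGetD guiso i "" == "lengua" then precio + 10
      else if PySem.List.pyGetD guiso i "" == "tripitas" then precio + 9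
      else if PySem.List.pyGetD guiso i "" == "pastor" then precio + 15
      else if PySem.List.pyGetD guiso i "" == "machito" then precio + 14
      else precio) precio
  else precio

-- ===== PORT B =====
-- the module-level MENU list of Source B
def pvMenu : List (String × Int) :=
  [("cachete", 13), ("lengua", 10), ("tripitas", 9), ("pastor", 15), ("machito", 14)]

def parcial_uno_alt (entrada : String) : Int :=
  let palabras := PySem.Str.split₀ entrada
  if (palabras.length : Int) > 30 then 0
  else pvMenu.foldl (fun total kp => total + (PySem.List.count palabras kp.1) * kp.2) 0

-- ===== PRECONDITION & SPEC =====
def Spec_parcial_uno (entrada : String) (out : Int) : Prop := out = parcial_uno_alt entrada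
instance (entrada : String) (out : Int) : Decidable (Spec_parcial_uno entrada out) := by unfold Spec_parcial_uno; infer_instance

-- ===== CLAIM =====
def Claim_equal_parcial_uno : Prop := ∀ (entrada : String), Dom_parcial_uno entrada → Spec_parcial_uno entrada (parcial_uno entrada)

-- ===== LEMMAS AND PROOFS =====
-- A's loop over the words equals the weighted sum of the five counts
lemma pv_foldl_prices (l : List String) (acc : Int) :
    l.foldl (fun precio w =>
      if w == "cachete" then precio + 13
      else if w == "lengua" then precio + 10
      else if w == "tripitas" then precio + 9
      else if w == "pastor" then precio + 15
      else if w == "machito" then precio + 14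
      else precio) acc
    = acc + (l.count "cachete" : Int) * 13 + (l.count "lengua" : Int) * 10
        + (l.count "tripitas" : Int) * 9 + (l.count "pastor" : Int) * 15
        + (l.count "machito" : Int) * 14 := by
  induction l generalizing acc with
  | nil => simp
  | cons h t ih =>
    simp only [List.foldl_cons, ih, List.count_cons]
    split_ifs with h1 h2 h3 h4 h5 <;> simp_all [beq_iff_eq] <;> ring

theorem parcial_uno_spec : Claim_equal_parcial_uno := by
  intro entrada _
  unfold Spec_parcial_uno parcial_uno parcial_uno_alt
  simp only []
  set guiso := PySem.Str.split₀ entrada with hg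
  by_cases h : (guiso.length : Int) ≤ 30
  · rw [if_pos h, if_neg (by omega)]
    rw [show ((guiso.length : Int)) = PySem.List.len guiso from rfl]
    rw [PySem.List.foldl_pyRange_pyGetD (f := fun precio w =>
      if w == "cachete" then precio + 13
      else if w == "lengua" then precio + 10
      else if w == "tripitas" then precio + 9
      else if w == "pastor" then precio + 15
      else if w == "machito" then precio + 14
      else precio) (a := 0) (init := 0) (d := "") (xs := guiso) (by omega)]
    simp only [Int.toNat_zero, List.drop_zero, pv_foldl_prices, pvMenu,
      List.foldl_cons, List.foldl_nil, PySem.List.count_eq]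
  · rw [if_neg h, if_pos (by omega)]
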